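-- pv_equiv track=rewrite | github.com/JadAlSoukarieh/week2-real-estate-agent | app/services/interpretation_service.py | humanize_interpretation_text
-- ===== SOURCE A (Python) =====
-- def humanize_interpretation_text(text: str) -> str:
--     replacements = {
--         "Overall Qual": "Overall quality",
--         "Gr Liv Area": "Above-ground living area",
--         "Kitchen Qual": "Kitchen quality",
--         "Garage Cars": "Garage spaces",
--         "Total Bsmt SF": "Total basement size",
--         "Year Remod/Add": "Year remodeled",
--         "Full Bath": "Full bathrooms",
--         "sqft": "sq ft",
--     }
--
--     humanized = text
--     for source, target in replacements.items():
--         humanized = humanized.replace(source, target)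
--
--     return " ".join(humanized.split())
-- ===== SOURCE B (Python) =====
-- def humanize_interpretation_text(text: str) -> str:
--     # Single left-to-right scan dispatching each term through the table
--     # (instead of eight sequential full-string passes), then the same
--     # whitespace normalization.
--     pairs = [
--         ("Overall Qual", "Overall quality"),
--         ("Gr Liv Area", "Above-ground living area"),
--         ("Kitchen Qual", "Kitchen quality"),
--         ("Garage Cars", "Garage spaces"),
--         ("Total Bsmt SF", "Total basement size"),
--         ("Year Remod/Add", "Year remodeled"),
--         ("Full Bath", "Full bathrooms"),
--         ("sqft", "sq ft"),
--     ]
--     out = []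
--     i = 0
--     n = len(text)
--     while i < n:
--         for source, target in pairs:
--             if text.startswith(source, i):
--                 out.append(target)
--                 i += len(source)
--                 break
--         else:
--             out.append(text[i])
--             i += 1
--     return " ".join("".join(out).split())
-- ===== Notes on version B (the rewrite author's own statement) =====
-- stated objective: alternative
-- what changed: B replaces all eight jargon terms in one left-to-right scan over the text (first matching term at each position, as a regex-alternation substitution would) instead of A's eight sequential full-string replace passes, with the same whitespace normalization; …
-- outside the precondition, e.g. on humanize_interpretation_text('Full Bathqft'): A returns 'Full bathroomsq ft', B returns 'Full bathroomsqft'; on humanize_interpretation_text('Garage Carsqft'): A returns 'Garage spacesq ft', B returns 'Garage spacesqft'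
import Mathlib
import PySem

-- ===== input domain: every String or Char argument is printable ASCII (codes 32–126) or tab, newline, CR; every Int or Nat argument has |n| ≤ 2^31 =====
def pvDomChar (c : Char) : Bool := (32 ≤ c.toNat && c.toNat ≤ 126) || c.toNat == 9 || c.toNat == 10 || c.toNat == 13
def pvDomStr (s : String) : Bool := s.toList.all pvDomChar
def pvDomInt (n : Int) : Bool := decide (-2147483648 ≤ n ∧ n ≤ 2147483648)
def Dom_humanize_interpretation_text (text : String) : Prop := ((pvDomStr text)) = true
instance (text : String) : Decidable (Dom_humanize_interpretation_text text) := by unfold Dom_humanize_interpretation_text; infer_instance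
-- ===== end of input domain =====

-- B replaces all eight jargon terms in ONE left-to-right scan (first matching term at
-- each position) instead of A's eight sequential full-string replace passes; the final
-- whitespace normalization is unchanged.

-- ===== PORT A =====
def humanize_interpretation_text (text : String) : String :=
  PySem.Str.join " " (PySem.Str.split₀
    (([("Overall Qual", "Overall quality"),
       ("Gr Liv Area", "Above-ground living area"),
       ("Kitchen Qual", "Kitchen quality"),
       ("Garage Cars", "Garage spaces"),
       ("Total Bsmt SF", "Total basement size"),
       ("Year Remod/Add", "Year remodeled"),
       ("Full Bath", "Full bathrooms"),
       ("sqft", "sq ft")] : List (String × String)).foldl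
      (fun humanized p => PySem.Str.replace humanized p.1 p.2) text))

-- ===== PORT B =====
-- the eight (source, target) pairs, indexed in table order
def pvK : Fin 8 → List Char
  | 0 => "Overall Qual".toList
  | 1 => "Gr Liv Area".toList
  | 2 => "Kitchen Qual".toList
  | 3 => "Garage Cars".toList
  | 4 => "Total Bsmt SF".toList
  | 5 => "Year Remod/Add".toList
  | 6 => "Full Bath".toList
  | 7 => "sqft".toList

def pvT : Fin 8 → List Char
  | 0 => "Overall quality".toList
  | 1 => "Above-ground living area".toList
  | 2 => "Kitchen quality".toList
  | 3 => "Garage spaces".toList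
  | 4 => "Total basement size".toList
  | 5 => "Year remodeled".toList
  | 6 => "Full bathrooms".toList
  | 7 => "sq ft".toList

-- Source B's inner `for source, target in pairs: if text.startswith(source, i): … break`
def pvFirstKey (l : List Char) : Option (Fin 8) :=
  (List.finRange 8).find? (fun i => (pvK i).isPrefixOf l)

-- Source B's single left-to-right scan (fuel = remaining length, mirroring `while i < n`)
def pvScanGo : Nat → List Char → List Char
  | _, [] => []
  | 0, _ :: _ => []
  | fuel + 1, c :: rest =>
    match pvFirstKey (c :: rest) with
    | some i => pvT i ++ pvScanGo fuel ((c :: rest).drop (pvK i).length)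
    | none => c :: pvScanGo fuel rest

def pvScan (l : List Char) : List Char := pvScanGo l.length l

def humanize_interpretation_text_alt (text : String) : String :=
  PySem.Str.join " " (PySem.Str.split₀ (String.ofList (pvScan text.toList)))

-- ===== PRECONDITION & SPEC =====
-- Pre_ excludes texts containing "Full Bathqft" or "Garage Carsqft": there the tail of an
-- earlier replacement together with the following input letters spells another jargon term
-- as a synthetic seam, and whether a later pass should rewrite that seam (A's eight
-- sequential passes do, a single left-to-right substitution pass does not) is an accidental
-- artefact of pass structure that no caller would specify either way.
def Pre_humanize_interpretation_text (text : String) : Prop :=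
  PySem.Str.isIn "Full Bathqft" text = false ∧ PySem.Str.isIn "Garage Carsqft" text = false
instance (text : String) : Decidable (Pre_humanize_interpretation_text text) := by
  unfold Pre_humanize_interpretation_text; infer_instance

def pvWitness_humanize_interpretation_text : String := "Overall Qual 8, Gr Liv Area 1500 sqft"

def Spec_humanize_interpretation_text (text : String) (out : String) : Prop :=
  out = humanize_interpretation_text_alt text
instance (text : String) (out : String) : Decidable (Spec_humanize_interpretation_text text out) := by
  unfold Spec_humanize_interpretation_text; infer_instance

-- ===== CLAIM =====
def Claim_equal_humanize_interpretation_text : Prop := ∀ (text : String), Dom_humanize_interpretation_text text → Pre_humanize_interpretation_text text → Spec_humanize_interpretation_text text (humanize_interpretation_text text)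

-- ===== LEMMAS AND PROOFS =====

theorem pvK_len : ∀ i : Fin 8, 2 ≤ (pvK i).length := by decide


-- ---- a recursion-friendly model of CPython str.replace (PySem.Chars.replace) ----
def pvRepl (old nw : List Char) (l : List Char) : List Char :=
  match l with
  | [] => []
  | c :: rest =>
    if h : old.isPrefixOf (c :: rest) ∧ old ≠ [] then
      nw ++ pvRepl old nw ((c :: rest).drop old.length)
    else c :: pvRepl old nw rest
termination_by l.length
decreasing_by
  · have : 1 ≤ old.length := by
      cases old with | nil => exact absurd rfl h.2 | cons a t => simp
    simp [List.length_drop]; omega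
  · simp

theorem pvGo_acc (old nw : List Char) : ∀ (fuel : Nat) (l acc : List Char),
    PySem.Chars.replace.go old nw fuel l acc = acc.reverse ++ PySem.Chars.replace.go old nw fuel l [] := by
  intro fuel
  induction fuel with
  | zero => intro l acc; simp [PySem.Chars.replace.go]
  | succ n ih =>
    intro l acc
    cases l with
    | nil => simp [PySem.Chars.replace.go]
    | cons c t =>
      simp only [PySem.Chars.replace.go]
      split
      · rw [ih _ (nw.reverse ++ acc), ih _ (nw.reverse ++ [])]
        simp
      · rw [ih _ (c :: acc), ih _ [c]]
        simp

theorem pvGo_eq (old nw : List Char) (hold : old ≠ []) :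
    ∀ (fuel : Nat) (l : List Char), l.length ≤ fuel →
    PySem.Chars.replace.go old nw fuel l [] = pvRepl old nw l := by
  intro fuel
  induction fuel with
  | zero =>
    intro l hl
    have : l = [] := by cases l <;> simp_all
    subst this; simp [PySem.Chars.replace.go, pvRepl]
  | succ n ih =>
    intro l hl
    cases l with
    | nil => simp [PySem.Chars.replace.go, pvRepl]
    | cons c t =>
      simp only [PySem.Chars.replace.go]
      rw [pvRepl]
      split
      · rename_i hp
        rw [dif_pos ⟨hp, hold⟩]
        rw [pvGo_acc, ih]
        · simp
        · have h1 : 1 ≤ old.length := by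
            cases old with | nil => exact absurd rfl hold | cons a t => simp
          simp at hl ⊢
          omega
      · rename_i hp
        rw [dif_neg (by simp [hp])]
        rw [pvGo_acc, ih]
        · simp
        · simp at hl; omega

theorem pvReplace_eq (old nw l : List Char) (hold : old ≠ []) :
    PySem.Chars.replace l old nw = pvRepl old nw l := by
  rw [PySem.Chars.replace, if_neg (by simp [hold])]
  exact pvGo_eq old nw hold l.length l le_rfl

theorem pvRepl_nil (old nw : List Char) : pvRepl old nw [] = [] := by rw [pvRepl]

theorem pvRepl_cons (old nw : List Char) (c : Char) (l : List Char)
    (h : ¬ old <+: (c :: l)) : pvRepl old nw (c :: l) = c :: pvRepl old nw l := by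
  rw [pvRepl, dif_neg]
  intro hc
  exact h (List.isPrefixOf_iff_prefix.mp hc.1)

theorem pvRepl_match (old nw l : List Char) (hold : old ≠ []) :
    pvRepl old nw (old ++ l) = nw ++ pvRepl old nw l := by
  cases hO : old with
  | nil => exact absurd hO hold
  | cons o ot =>
    rw [← hO]
    have hcons : old ++ l = o :: (ot ++ l) := by rw [hO]; simp
    rw [hcons, pvRepl, dif_pos]
    · rw [← hcons, List.drop_left]
    · constructor
      · rw [← hcons]; exact List.isPrefixOf_iff_prefix.mpr (List.prefix_append old l)
      · exact hold

theorem pvPrefixSplit (old u w : List Char) (h : old <+: u ++ w) :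
    old <+: u ∨ (u <+: old ∧ old.drop u.length <+: w) := by
  by_cases hle : old.length ≤ u.length
  · exact Or.inl ((List.isPrefix_append_of_length hle).mp h)
  · right
    have hu : u <+: u ++ w := List.prefix_append u w
    have hcmp : old <+: u ∨ u <+: old := List.prefix_or_prefix_of_prefix h hu
    have huo : u <+: old := by
      rcases hcmp with h1 | h1
      · exact absurd h1.length_le hle
      · exact h1
    refine ⟨huo, ?_⟩
    obtain ⟨r, hr⟩ := huo
    subst hr
    simp only [List.drop_left]
    exact (List.prefix_append_right_inj u).mp h

theorem pvRepl_push (old nw : List Char) (hold : old ≠ []) :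
    ∀ (x rest : List Char), (∀ u, u <:+ x → u ≠ [] → ¬ old <+: (u ++ rest)) →
    pvRepl old nw (x ++ rest) = x ++ pvRepl old nw rest := by
  intro x
  induction x with
  | nil => intro rest _; simp
  | cons c x' ih =>
    intro rest h
    have h1 : ¬ old <+: (c :: (x' ++ rest)) := by
      have := h (c :: x') (List.suffix_refl _) (by simp)
      simpa using this
    rw [List.cons_append, pvRepl_cons _ _ _ _ h1,
      ih rest (fun u hu hne => h u (hu.trans (List.suffix_cons c x')) hne)]
    simp

-- ---- token view of the single-pass scan ----
inductive pvTok where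
  | lit (c : Char)
  | key (i : Fin 8)
deriving DecidableEq, Repr

def pvRenderS : List pvTok → List Char
  | [] => []
  | pvTok.key i :: ts => pvK i ++ pvRenderS ts
  | pvTok.lit c :: ts => c :: pvRenderS ts

-- render after the first j replacement passes have run
def pvRender (j : Nat) : List pvTok → List Char
  | [] => []
  | pvTok.key i :: ts => (if i.val < j then pvT i else pvK i) ++ pvRender j ts
  | pvTok.lit c :: ts => c :: pvRender j ts

def pvParseGo : Nat → List Char → List pvTok
  | _, [] => []
  | 0, _ :: _ => []
  | fuel + 1, c :: rest =>
    match pvFirstKey (c :: rest) with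
    | some i => pvTok.key i :: pvParseGo fuel ((c :: rest).drop (pvK i).length)
    | none => pvTok.lit c :: pvParseGo fuel rest

def pvParse (l : List Char) : List pvTok := pvParseGo l.length l

inductive pvParsed : List pvTok → Prop where
  | nil : pvParsed []
  | key (i : Fin 8) (ts : List pvTok) : pvParsed ts → pvParsed (pvTok.key i :: ts)
  | lit (c : Char) (ts : List pvTok) : pvParsed ts →
      (∀ i : Fin 8, ¬ pvK i <+: c :: pvRenderS ts) → pvParsed (pvTok.lit c :: ts)

theorem pvFirstKey_some {l : List Char} {i : Fin 8} (h : pvFirstKey l = some i) :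
    pvK i <+: l := by
  have := List.find?_some h
  exact List.isPrefixOf_iff_prefix.mp this

theorem pvFirstKey_none {l : List Char} (h : pvFirstKey l = none) :
    ∀ i : Fin 8, ¬ pvK i <+: l := by
  intro i hp
  have := List.find?_eq_none.mp h i (List.mem_finRange i)
  simp [List.isPrefixOf_iff_prefix.mpr hp] at this

theorem pvDropBound {c : Char} {rest : List Char} {n : Nat} (i : Fin 8)
    (hl : (c :: rest).length ≤ n + 1) : (List.drop (pvK i).length (c :: rest)).length ≤ n := by
  have := pvK_len i
  simp only [List.length_drop, List.length_cons] at *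
  omega

theorem pvParseGo_sound : ∀ (n : Nat) (l : List Char), l.length ≤ n →
    pvRenderS (pvParseGo n l) = l := by
  intro n
  induction n with
  | zero =>
    intro l hl
    have : l = [] := by cases l <;> simp_all
    subst this; rfl
  | succ n ih =>
    intro l hl
    cases l with
    | nil => rfl
    | cons c rest =>
      cases hf : pvFirstKey (c :: rest) with
      | some i =>
        simp only [pvParseGo, hf, pvRenderS]
        rw [ih _ (pvDropBound i hl)]
        obtain ⟨r, hr⟩ := pvFirstKey_some hf
        rw [← hr, List.drop_left]
      | none =>
        simp only [pvParseGo, hf, pvRenderS]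
        rw [ih _ (by simp at hl ⊢; omega)]

theorem pvParseGo_parsed : ∀ (n : Nat) (l : List Char), l.length ≤ n →
    pvParsed (pvParseGo n l) := by
  intro n
  induction n with
  | zero =>
    intro l hl
    have : l = [] := by cases l <;> simp_all
    subst this; exact pvParsed.nil
  | succ n ih =>
    intro l hl
    cases l with
    | nil => exact pvParsed.nil
    | cons c rest =>
      cases hf : pvFirstKey (c :: rest) with
      | some i =>
        simp only [pvParseGo, hf]
        exact pvParsed.key _ _ (ih _ (pvDropBound i hl))
      | none =>
        simp only [pvParseGo, hf]
        have hrest : rest.length ≤ n := by simp at hl; omega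
        refine pvParsed.lit _ _ (ih _ hrest) ?_
        rw [pvParseGo_sound n rest hrest]
        exact pvFirstKey_none hf

theorem pvParse_sound (l : List Char) : pvRenderS (pvParse l) = l :=
  pvParseGo_sound l.length l le_rfl

theorem pvParse_parsed (l : List Char) : pvParsed (pvParse l) :=
  pvParseGo_parsed l.length l le_rfl

theorem pvRender_zero (toks : List pvTok) : pvRender 0 toks = pvRenderS toks := by
  induction toks with
  | nil => rfl
  | cons t ts ih =>
    cases t with
    | lit c => simp [pvRender, pvRenderS, ih]
    | key i => simp [pvRender, pvRenderS, ih]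

theorem pvScanGo_eq : ∀ (n : Nat) (l : List Char), l.length ≤ n →
    pvScanGo n l = pvRender 8 (pvParseGo n l) := by
  intro n
  induction n with
  | zero =>
    intro l hl
    have : l = [] := by cases l <;> simp_all
    subst this; rfl
  | succ n ih =>
    intro l hl
    cases l with
    | nil => rfl
    | cons c rest =>
      cases hf : pvFirstKey (c :: rest) with
      | some i =>
        simp only [pvScanGo, pvParseGo, hf, pvRender, if_pos i.isLt]
        rw [ih _ (pvDropBound i hl)]
      | none =>
        simp only [pvScanGo, pvParseGo, hf, pvRender]
        rw [ih _ (by simp at hl ⊢; omega)]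

theorem pvScan_eq (l : List Char) : pvScan l = pvRender 8 (pvParse l) :=
  pvScanGo_eq l.length l le_rfl

-- ---- the "no cascade seam" condition and its consequences ----
def pvGood (s : List Char) : Prop :=
  ¬ ("Full Bathqft".toList <:+: s) ∧ ¬ ("Garage Carsqft".toList <:+: s)

theorem pvGood_mono {s t : List Char} (h : t <:+: s) (hg : pvGood s) : pvGood t :=
  ⟨fun hx => hg.1 (hx.trans h), fun hx => hg.2 (hx.trans h)⟩

-- finite string-combinatorial facts about the eight (source, target) pairs
theorem pvFact1 : ∀ a b : Fin 8, a ≠ b → ¬ pvK a <:+: pvK b := by decide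
theorem pvFact2T : ∀ m i : Fin 8, ¬ pvK m <:+: pvT i := by decide
theorem pvFact4 : ∀ i m : Fin 8, m.val < i.val → ∀ u ∈ (pvK i).tails, u = [] ∨ ¬ u <+: pvK m := by decide
theorem pvFact5 : ∀ i m : Fin 8, i.val < m.val → ∀ u ∈ (pvT i).tails,
    u = [] ∨ ¬ u <+: pvK m ∨ (m = 7 ∧ (i = 3 ∨ i = 6) ∧ u = ['s']) := by decide
theorem pvFact6a : ∀ m i : Fin 8, i.val < m.val → ∀ u ∈ (pvK m).tails,
    u = [] ∨ u = pvK m ∨ ¬ u <+: pvT i := by decide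
theorem pvFact6b : ∀ m i : Fin 8, i.val < m.val → ¬ pvT i <:+: pvK m := by decide
theorem pvHeadsQ : ∀ i : Fin 8, ¬ (pvK i).head? = some 'q' ∧ ¬ (pvT i).head? = some 'q' := by decide
theorem pvHeadsF : ∀ i : Fin 8, ¬ (pvK i).head? = some 'f' ∧ ¬ (pvT i).head? = some 'f' := by decide
theorem pvHeadsT : ∀ i : Fin 8, ¬ (pvK i).head? = some 't' ∧ ¬ (pvT i).head? = some 't' := by decide
theorem pvKT_ne : ∀ i : Fin 8, pvK i ≠ [] ∧ pvT i ≠ [] := by decide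

theorem pvHeadLit (j : Nat) (c : Char) (hc : ∀ i : Fin 8, ¬ (pvK i).head? = some c ∧ ¬ (pvT i).head? = some c) :
    ∀ (ts : List pvTok) (w : List Char), pvRender j ts = c :: w →
    ∃ ts', ts = pvTok.lit c :: ts' ∧ w = pvRender j ts' := by
  intro ts w h
  cases ts with
  | nil => simp [pvRender] at h
  | cons t ts' =>
    cases t with
    | lit c' =>
      simp only [pvRender] at h
      obtain ⟨h1, h2⟩ := List.cons.inj h
      exact ⟨ts', by rw [h1], h2.symm⟩
    | key i =>
      exfalso
      simp only [pvRender] at h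
      by_cases hij : i.val < j
      · rw [if_pos hij] at h
        cases hT : pvT i with
        | nil => exact (pvKT_ne i).2 hT
        | cons a x =>
          rw [hT] at h
          simp at h
          exact (hc i).2 (by rw [hT, h.1]; rfl)
      · rw [if_neg hij] at h
        cases hK : pvK i with
        | nil => exact (pvKT_ne i).1 hK
        | cons a x =>
          rw [hK] at h
          simp at h
          exact (hc i).1 (by rw [hK, h.1]; rfl)

theorem pvLitTransfer (m : Fin 8) (j : Nat) (hj : j ≤ m.val) :
    ∀ (ts : List pvTok) (k' : List Char), k' ≠ [] → k' <:+ pvK m → k' ≠ pvK m →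
    k' <+: pvRender j ts → k' <+: pvRenderS ts := by
  intro ts
  induction ts with
  | nil =>
    intro k' hne _ _ hp
    simp only [pvRender] at hp
    exact absurd (List.prefix_nil.mp hp) hne
  | cons t ts ih =>
    intro k' hne hsfx hnefull hp
    cases t with
    | lit c =>
      cases k' with
      | nil => exact absurd rfl hne
      | cons a k₂ =>
        simp only [pvRender] at hp
        rw [List.cons_prefix_cons] at hp
        obtain ⟨hac, hk₂⟩ := hp
        subst hac
        by_cases hk2e : k₂ = []
        · subst hk2e
          simp only [pvRenderS]
          exact List.cons_prefix_cons.mpr ⟨rfl, List.nil_prefix⟩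
        · have hk₂sfx : k₂ <:+ pvK m := (List.suffix_cons a k₂).trans hsfx
          have hk₂ne : k₂ ≠ pvK m := by
            intro he
            have h1 := hsfx.length_le
            rw [← he] at h1
            simp at h1
          have := ih k₂ hk2e hk₂sfx hk₂ne hk₂
          simp only [pvRenderS]
          exact List.cons_prefix_cons.mpr ⟨rfl, this⟩
    | key i =>
      simp only [pvRender] at hp
      by_cases hij : i.val < j
      · rw [if_pos hij] at hp
        have him : i.val < m.val := lt_of_lt_of_le hij hj
        rcases pvPrefixSplit k' (pvT i) (pvRender j ts) hp with hcase | ⟨hcase, _⟩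
        · exfalso
          have := pvFact6a m i him k' (((List.mem_tails _ _).mpr hsfx))
          rcases this with h | h | h
          · exact hne h
          · exact hnefull h
          · exact h hcase
        · exfalso
          have hinf : pvT i <:+: k' := hcase.isInfix
          exact pvFact6b m i him (hinf.trans hsfx.isInfix)
      · rw [if_neg hij] at hp
        rcases pvPrefixSplit k' (pvK i) (pvRender j ts) hp with hcase | ⟨hcase, _⟩
        · simp only [pvRenderS]
          exact hcase.trans (List.prefix_append _ _)
        · -- pvK i <+: k' <:+ pvK m
          exfalso
          by_cases him : i = m
          · subst him
            have h1 := hcase.length_le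
            have h2 := hsfx.length_le
            have h3 : k' = pvK i := hsfx.eq_of_length (le_antisymm h2 h1)
            exact hnefull h3
          · exact pvFact1 i m him (List.IsInfix.trans hcase.isInfix hsfx.isInfix)

theorem pvCore (m : Fin 8) : ∀ (toks : List pvTok), pvParsed toks → pvGood (pvRenderS toks) →
    pvRepl (pvK m) (pvT m) (pvRender m.val toks) = pvRender (m.val + 1) toks := by
  intro toks
  induction toks with
  | nil => intro _ _; simp [pvRender, pvRepl_nil]
  | cons t ts ih =>
    intro hparsed hgood
    have hKm_ne : pvK m ≠ [] := (pvKT_ne m).1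
    cases t with
    | lit c =>
      cases hparsed with
      | lit _ _ hpts hlit =>
        have hgood' : pvGood (pvRenderS ts) :=
          pvGood_mono ⟨[c], [], by simp [pvRenderS]⟩ hgood
        have hnp : ¬ pvK m <+: c :: pvRender m.val ts := by
          intro hpre
          cases hKm : pvK m with
          | nil => exact hKm_ne hKm
          | cons a k' =>
            rw [hKm, List.cons_prefix_cons] at hpre
            obtain ⟨hac, hk'⟩ := hpre
            have hk'ne : k' ≠ [] := by
              intro he
              have := pvK_len m
              rw [hKm, he] at this
              simp at this
            have hk'sfx : k' <:+ pvK m := by rw [hKm]; exact List.suffix_cons a k'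
            have hk'nf : k' ≠ pvK m := by
              intro he
              rw [hKm] at he
              have : (a :: k').length = k'.length := by rw [← he]
              simp at this
            have := pvLitTransfer m m.val le_rfl ts k' hk'ne hk'sfx hk'nf hk'
            exact hlit m (by rw [hKm, List.cons_prefix_cons]; exact ⟨hac, this⟩)
        simp only [pvRender]
        rw [pvRepl_cons _ _ _ _ hnp, ih hpts hgood']
    | key i =>
      cases hparsed with
      | key _ _ hpts =>
        have hgood' : pvGood (pvRenderS ts) :=
          pvGood_mono ⟨pvK i, [], by simp [pvRenderS]⟩ hgood
        by_cases him : i = m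
        · subst him
          simp only [pvRender]
          rw [if_neg (Nat.lt_irrefl i.val), if_pos (Nat.lt_succ_self i.val)]
          rw [pvRepl_match _ _ _ hKm_ne, ih hpts hgood']
        · -- i ≠ m : push through the rendered token
          have hx : ∀ u, u <:+ (if i.val < m.val then pvT i else pvK i) → u ≠ [] →
              ¬ pvK m <+: u ++ pvRender m.val ts := by
            intro u hu hne hpre
            rcases pvPrefixSplit (pvK m) u (pvRender m.val ts) hpre with hcase | ⟨hcase, hb⟩
            · -- pvK m inside the token text
              by_cases hij : i.val < m.val
              · rw [if_pos hij] at hu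
                exact pvFact2T m i (hcase.isInfix.trans hu.isInfix)
              · rw [if_neg hij] at hu
                exact pvFact1 m i (Ne.symm him) (hcase.isInfix.trans hu.isInfix)
            · by_cases hufull : u = pvK m
              · subst hufull
                by_cases hij : i.val < m.val
                · rw [if_pos hij] at hu
                  exact pvFact2T m i hu.isInfix
                · rw [if_neg hij] at hu
                  exact pvFact1 m i (Ne.symm him) hu.isInfix
              · by_cases hij : i.val < m.val
                · rw [if_pos hij] at hu
                  rcases pvFact5 i m hij u (((List.mem_tails _ _).mpr hu)) with h | h | ⟨hm7, hi36, hus⟩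
                  · exact hne h
                  · exact h hcase
                  · -- the cascade seam: u = "s", m = sqft; ts must start with lits q,f,t
                    have hb' : ['q', 'f', 't'] <+: pvRender m.val ts := by
                      have hd : (pvK m).drop u.length = ['q', 'f', 't'] := by
                        rw [hm7, hus]; decide
                      rw [← hd]
                      exact hb
                    obtain ⟨w, hw⟩ := hb'
                    have hq := pvHeadLit m.val 'q' pvHeadsQ ts _ (by rw [← hw]; rfl)
                    obtain ⟨ts1, hts1, hr1⟩ := hq
                    have hf := pvHeadLit m.val 'f' pvHeadsF ts1 _ (by rw [← hr1]; rfl)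
                    obtain ⟨ts2, hts2, hr2⟩ := hf
                    have ht := pvHeadLit m.val 't' pvHeadsT ts2 _ (by rw [← hr2]; rfl)
                    obtain ⟨ts3, hts3, hr3⟩ := ht
                    -- renderS (key i :: ts) starts with pvK i ++ "qft" → bad substring
                    have hstart : pvRenderS (pvTok.key i :: ts) =
                        (pvK i ++ ['q', 'f', 't']) ++ pvRenderS ts3 := by
                      rw [hts1, hts2, hts3]
                      simp [pvRenderS]
                    rcases hi36 with hi | hi
                    · subst hi
                      refine hgood.2 ?_
                      refine ⟨[], pvRenderS ts3, ?_⟩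
                      rw [hstart]
                      have hb2 : "Garage Carsqft".toList = pvK (3 : Fin 8) ++ ['q', 'f', 't'] := by decide
                      rw [hb2]
                      simp
                    · subst hi
                      refine hgood.1 ?_
                      refine ⟨[], pvRenderS ts3, ?_⟩
                      rw [hstart]
                      have hb1 : "Full Bathqft".toList = pvK (6 : Fin 8) ++ ['q', 'f', 't'] := by decide
                      rw [hb1]
                      simp
                · rw [if_neg hij] at hu
                  have hmi : m.val < i.val := by
                    have hne' : i.val ≠ m.val := fun hh => him (Fin.ext hh)
                    omega
                  rcases pvFact4 i m hmi u (((List.mem_tails _ _).mpr hu)) with h | h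
                  · exact hne h
                  · exact h hcase
          simp only [pvRender]
          have hxx : (if i.val < m.val + 1 then pvT i else pvK i) = (if i.val < m.val then pvT i else pvK i) := by
            have hne' : i.val ≠ m.val := fun h => him (Fin.ext h)
            by_cases hij : i.val < m.val
            · rw [if_pos hij, if_pos (Nat.lt_succ_of_lt hij)]
            · rw [if_neg hij, if_neg (by omega)]
          rw [hxx, pvRepl_push _ _ hKm_ne _ _ hx, ih hpts hgood']

theorem pvReplace_eq' (i : Fin 8) (l : List Char) :
    PySem.Chars.replace l (pvK i) (pvT i) = pvRepl (pvK i) (pvT i) l :=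
  pvReplace_eq _ _ _ (pvKT_ne i).1

theorem pvChain (l : List Char) (hg : pvGood l) :
    pvRepl (pvK 7) (pvT 7) (pvRepl (pvK 6) (pvT 6) (pvRepl (pvK 5) (pvT 5) (pvRepl (pvK 4) (pvT 4)
      (pvRepl (pvK 3) (pvT 3) (pvRepl (pvK 2) (pvT 2) (pvRepl (pvK 1) (pvT 1)
        (pvRepl (pvK 0) (pvT 0) l))))))) = pvScan l := by
  have hp := pvParse_parsed l
  have hs := pvParse_sound l
  have hg' : pvGood (pvRenderS (pvParse l)) := by rw [hs]; exact hg
  have h0 : pvRender 0 (pvParse l) = l := by rw [pvRender_zero, hs]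
  have c0 : pvRepl (pvK 0) (pvT 0) (pvRender 0 (pvParse l)) = pvRender 1 (pvParse l) :=
    pvCore 0 (pvParse l) hp hg'
  have c1 : pvRepl (pvK 1) (pvT 1) (pvRender 1 (pvParse l)) = pvRender 2 (pvParse l) :=
    pvCore 1 (pvParse l) hp hg'
  have c2 : pvRepl (pvK 2) (pvT 2) (pvRender 2 (pvParse l)) = pvRender 3 (pvParse l) :=
    pvCore 2 (pvParse l) hp hg'
  have c3 : pvRepl (pvK 3) (pvT 3) (pvRender 3 (pvParse l)) = pvRender 4 (pvParse l) :=
    pvCore 3 (pvParse l) hp hg'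
  have c4 : pvRepl (pvK 4) (pvT 4) (pvRender 4 (pvParse l)) = pvRender 5 (pvParse l) :=
    pvCore 4 (pvParse l) hp hg'
  have c5 : pvRepl (pvK 5) (pvT 5) (pvRender 5 (pvParse l)) = pvRender 6 (pvParse l) :=
    pvCore 5 (pvParse l) hp hg'
  have c6 : pvRepl (pvK 6) (pvT 6) (pvRender 6 (pvParse l)) = pvRender 7 (pvParse l) :=
    pvCore 6 (pvParse l) hp hg'
  have c7 : pvRepl (pvK 7) (pvT 7) (pvRender 7 (pvParse l)) = pvRender 8 (pvParse l) :=
    pvCore 7 (pvParse l) hp hg'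
  rw [h0] at c0
  rw [pvScan_eq, c0, c1, c2, c3, c4, c5, c6, c7]

-- ===== VERDICT =====
theorem humanize_interpretation_text_spec : Claim_equal_humanize_interpretation_text := by
  unfold Claim_equal_humanize_interpretation_text
  intro text _hdom hPre
  unfold Spec_humanize_interpretation_text
  obtain ⟨hP1, hP2⟩ := hPre
  have hg : pvGood text.toList := by
    refine ⟨fun hinf => ?_, fun hinf => ?_⟩
    · rw [(PySem.Str.isIn_iff_infix _ _).mpr hinf] at hP1; simp at hP1
    · rw [(PySem.Str.isIn_iff_infix _ _).mpr hinf] at hP2; simp at hP2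
  unfold humanize_interpretation_text humanize_interpretation_text_alt
  have hfold :
      ([("Overall Qual", "Overall quality"),
        ("Gr Liv Area", "Above-ground living area"),
        ("Kitchen Qual", "Kitchen quality"),
        ("Garage Cars", "Garage spaces"),
        ("Total Bsmt SF", "Total basement size"),
        ("Year Remod/Add", "Year remodeled"),
        ("Full Bath", "Full bathrooms"),
        ("sqft", "sq ft")] : List (String × String)).foldl
        (fun humanized p => PySem.Str.replace humanized p.1 p.2) text
      = String.ofList (pvScan text.toList) := by
    have ht :
        (([("Overall Qual", "Overall quality"),
          ("Gr Liv Area", "Above-ground living area"),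
          ("Kitchen Qual", "Kitchen quality"),
          ("Garage Cars", "Garage spaces"),
          ("Total Bsmt SF", "Total basement size"),
          ("Year Remod/Add", "Year remodeled"),
          ("Full Bath", "Full bathrooms"),
          ("sqft", "sq ft")] : List (String × String)).foldl
          (fun humanized p => PySem.Str.replace humanized p.1 p.2) text).toList
        = pvScan text.toList := by
      simp only [List.foldl_cons, List.foldl_nil]
      simp only [PySem.Str.toList_replace]
      rw [show ("Overall Qual" : String).toList = pvK 0 from rfl,
          show ("Overall quality" : String).toList = pvT 0 from rfl,
          show ("Gr Liv Area" : String).toList = pvK 1 from rfl,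
          show ("Above-ground living area" : String).toList = pvT 1 from rfl,
          show ("Kitchen Qual" : String).toList = pvK 2 from rfl,
          show ("Kitchen quality" : String).toList = pvT 2 from rfl,
          show ("Garage Cars" : String).toList = pvK 3 from rfl,
          show ("Garage spaces" : String).toList = pvT 3 from rfl,
          show ("Total Bsmt SF" : String).toList = pvK 4 from rfl,
          show ("Total basement size" : String).toList = pvT 4 from rfl,
          show ("Year Remod/Add" : String).toList = pvK 5 from rfl,
          show ("Year remodeled" : String).toList = pvT 5 from rfl,
          show ("Full Bath" : String).toList = pvK 6 from rfl,
          show ("Full bathrooms" : String).toList = pvT 6 from rfl,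
          show ("sqft" : String).toList = pvK 7 from rfl,
          show ("sq ft" : String).toList = pvT 7 from rfl]
      simp only [pvReplace_eq']
      exact pvChain text.toList hg
    calc _ = String.ofList ((([("Overall Qual", "Overall quality"),
          ("Gr Liv Area", "Above-ground living area"),
          ("Kitchen Qual", "Kitchen quality"),
          ("Garage Cars", "Garage spaces"),
          ("Total Bsmt SF", "Total basement size"),
          ("Year Remod/Add", "Year remodeled"),
          ("Full Bath", "Full bathrooms"),
          ("sqft", "sq ft")] : List (String × String)).foldl
          (fun humanized p => PySem.Str.replace humanized p.1 p.2) text).toList) := String.ofList_toList.symm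
      _ = String.ofList (pvScan text.toList) := by rw [ht]
  rw [hfold]
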